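-- pv_equiv track=rewrite | github.com/HumbertoBPF/LeetCodePython | SolutionLeetCode1048.py | is_predecessor
-- ===== SOURCE A (Python) =====
-- def is_predecessor(predecessor_word, word):
--     pointer = 0
--
--     for letter in word:
--         if pointer >= len(predecessor_word):
--             return True
--
--         if letter == predecessor_word[pointer]:
--             pointer += 1
--
--     return pointer == len(predecessor_word)
-- ===== SOURCE B (Python) =====
-- def is_predecessor(predecessor_word, word):
--     # Index word once: for each character, the ascending list of its positions.
--     pos = {}
--     for i, ch in enumerate(word):
--         pos.setdefault(ch, []).append(i)
--     # Match each character of predecessor_word via binary search for the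
--     # first occurrence strictly after the previously matched position.
--     prev = -1
--     for c in predecessor_word:
--         lst = pos.get(c)
--         if lst is None:
--             return False
--         lo, hi = 0, len(lst)
--         while lo < hi:
--             mid = (lo + hi) // 2
--             if lst[mid] > prev:
--                 hi = mid
--             else:
--                 lo = mid + 1
--         if lo == len(lst):
--             return False
--         prev = lst[lo]
--     return True
-- ===== Notes on version B (the rewrite author's own statement) =====
-- stated objective: alternative
-- what changed: Replaces A's single greedy pointer scan of word with an index-based algorithm: build a dictionary mapping each character to its ascending list of positions in word once, then match each predecessor character by binary search for the first occurrence strictly after the previously matched position.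
import Mathlib
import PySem

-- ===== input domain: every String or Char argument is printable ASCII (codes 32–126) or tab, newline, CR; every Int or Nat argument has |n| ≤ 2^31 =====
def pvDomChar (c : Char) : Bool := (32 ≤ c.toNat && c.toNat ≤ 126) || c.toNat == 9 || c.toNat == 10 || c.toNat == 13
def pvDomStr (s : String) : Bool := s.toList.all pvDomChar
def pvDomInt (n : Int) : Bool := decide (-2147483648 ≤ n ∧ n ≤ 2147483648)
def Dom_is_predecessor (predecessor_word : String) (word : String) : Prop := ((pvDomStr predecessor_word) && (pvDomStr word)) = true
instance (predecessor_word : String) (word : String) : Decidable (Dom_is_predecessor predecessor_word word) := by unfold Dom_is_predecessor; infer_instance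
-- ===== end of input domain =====

-- B replaces A's single greedy scan of word by a different algorithm: it builds a
-- positions index (char → ascending occurrence list) of word once and matches each
-- predecessor character by binary search for the first occurrence after the last match.

-- ===== PORT A =====
-- A's for-loop over word with early return, carrying the integer `pointer`.
def isPredLoopA (p : List Char) : List Char → Int → Bool
  | [], pointer => pointer == (p.length : Int)
  | letter :: rest, pointer =>
    if (p.length : Int) ≤ pointer then true
    else if PySem.List.pyGet? p pointer == some letter then
      isPredLoopA p rest (pointer + 1)
    else
      isPredLoopA p rest pointer

def is_predecessor (predecessor_word : String) (word : String) : Bool :=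
  isPredLoopA predecessor_word.toList word.toList 0

-- ===== PORT B =====
-- for i, ch in enumerate(word): pos.setdefault(ch, []).append(i)
-- (pos.setdefault(ch, []).append(i) sets pos[ch] = pos.get(ch, []) + [i] = Dict.modify)
def buildPos (w : List Char) : PySem.Dict Char (List Int) :=
  (PySem.List.enumerate w).foldl (fun d q => d.modify q.2 [] (· ++ [q.1])) PySem.Dict.empty

-- the while-loop `lo, hi = 0, len(lst); while lo < hi: …`; lo, hi stay in [0, len(lst)],
-- so mid is always in range and Python's lst[mid] is ported as getD (never the default).
def bsearchFirstGt (lst : List Int) (prev : Int) (lo hi : Nat) : Nat :=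
  if h : lo < hi then
    if prev < lst.getD ((lo + hi) / 2) 0 then bsearchFirstGt lst prev lo ((lo + hi) / 2)
    else bsearchFirstGt lst prev ((lo + hi) / 2 + 1) hi
  else lo
termination_by hi - lo
decreasing_by all_goals omega

-- the for-loop over predecessor_word with early returns, carrying `prev`
def scanB (pos : PySem.Dict Char (List Int)) : List Char → Int → Bool
  | [], _ => true
  | c :: cs, prev =>
    match pos.get? c with
    | none => false
    | some lst =>
      -- `lo` is the loop's final value; `if lo == len(lst): return False; prev = lst[lo]`
      if bsearchFirstGt lst prev 0 lst.length = lst.length then false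
      else scanB pos cs (lst.getD (bsearchFirstGt lst prev 0 lst.length) 0)   -- lst[lo] in range

def is_predecessor_alt (predecessor_word : String) (word : String) : Bool :=
  scanB (buildPos word.toList) predecessor_word.toList (-1)

-- ===== PRECONDITION & SPEC =====
def Spec_is_predecessor (predecessor_word : String) (word : String) (out : Bool) : Prop := out = is_predecessor_alt predecessor_word word
instance (predecessor_word : String) (word : String) (out : Bool) : Decidable (Spec_is_predecessor predecessor_word word out) := by unfold Spec_is_predecessor; infer_instance

-- ===== CLAIM (what is proved, stated in full; the proofs are below) =====
def Claim_equal_is_predecessor : Prop := ∀ (predecessor_word : String) (word : String), Dom_is_predecessor predecessor_word word → Spec_is_predecessor predecessor_word word (is_predecessor predecessor_word word)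

-- ===== LEMMAS AND PROOFS =====

-- The ascending list of positions (as Python ints) of c in w.
def occList (w : List Char) (c : Char) : List Int :=
  ((PySem.List.enumerate w).filter (fun q => q.2 == c)).map (·.1)

theorem mem_occList (w : List Char) (c : Char) (i : Int) :
    i ∈ occList w c ↔ ∃ (k : Nat) (_ : k < w.length), i = (k : Int) ∧ w[k] = c := by
  unfold occList
  simp only [List.mem_map, List.mem_filter, PySem.List.mem_enumerate_iff]
  constructor
  · rintro ⟨⟨a, b⟩, ⟨⟨k, hk, hpq⟩, hb⟩, rfl⟩
    injection hpq with h1 h2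
    subst h1; subst h2
    exact ⟨k, hk, by simp, by simpa using hb⟩
  · rintro ⟨k, hk, rfl, hc⟩
    exact ⟨(0 + (k : Int), w[k]), ⟨⟨k, hk, rfl⟩, by simpa using hc⟩, by simp⟩

theorem occList_sorted (w : List Char) (c : Char) : (occList w c).Pairwise (· < ·) := by
  unfold occList
  exact (List.Pairwise.filter _ (PySem.List.pairwise_lt_enumerate w 0)).map _ (fun a b h => h)

theorem foldl_modify_swap (l : List (Int × Char)) (d : PySem.Dict Char (List Int)) :
    l.foldl (fun d q => d.modify q.2 [] (· ++ [q.1])) d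
      = (l.map (fun q => (q.2, q.1))).foldl (fun d p => d.modify p.1 [] (· ++ [p.2])) d := by
  induction l generalizing d with
  | nil => rfl
  | cons x xs ih => simp [ih]

theorem buildPos_getD (w : List Char) (c : Char) :
    (buildPos w).getD c [] = occList w c := by
  unfold buildPos occList
  rw [foldl_modify_swap, PySem.Dict.getD_foldl_modify_append]
  simp [List.filter_map, List.map_map, Function.comp_def]

theorem buildPos_get?_none (w : List Char) (c : Char)
    (h : (buildPos w).get? c = none) : occList w c = [] := by
  have hgd := buildPos_getD w c
  rw [PySem.Dict.getD_eq_get?_getD, h] at hgd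
  exact hgd.symm

theorem buildPos_get?_some (w : List Char) (c : Char) (lst : List Int)
    (h : (buildPos w).get? c = some lst) : lst = occList w c := by
  have := buildPos_getD w c
  rw [PySem.Dict.getD_eq_get?_getD, h] at this
  simpa using this

-- sorted list: index-monotone
theorem sorted_le_of_le (lst : List Int) (hs : lst.Pairwise (· < ·))
    {i j : Nat} (hi : i < lst.length) (hj : j < lst.length) (hij : i ≤ j) :
    lst[i] ≤ lst[j] := by
  rcases Nat.eq_or_lt_of_le hij with rfl | hlt
  · exact le_refl _
  · exact le_of_lt (List.pairwise_iff_getElem.mp hs i j hi hj hlt)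

-- Binary-search invariant: the loop returns the least index whose element exceeds prev.
theorem bsearch_spec (lst : List Int) (prev : Int) (hs : lst.Pairwise (· < ·)) :
    ∀ (n lo hi : Nat), hi - lo ≤ n → lo ≤ hi → hi ≤ lst.length →
    (∀ k (hk : k < lst.length), k < lo → lst[k] ≤ prev) →
    (∀ k (hk : k < lst.length), hi ≤ k → prev < lst[k]) →
    lo ≤ bsearchFirstGt lst prev lo hi ∧ bsearchFirstGt lst prev lo hi ≤ lst.length ∧
    (∀ k (hk : k < lst.length), k < bsearchFirstGt lst prev lo hi → lst[k] ≤ prev) ∧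
    (∀ k (hk : k < lst.length), bsearchFirstGt lst prev lo hi ≤ k → prev < lst[k]) := by
  intro n
  induction n with
  | zero =>
    intro lo hi hn h1 h2 hlow hhigh
    have heq : lo = hi := by omega
    rw [bsearchFirstGt, dif_neg (by omega : ¬ lo < hi)]
    exact ⟨le_refl _, by omega, hlow, fun k hk hlk => hhigh k hk (heq ▸ hlk)⟩
  | succ n ihn =>
    intro lo hi hn h1 h2 hlow hhigh
    by_cases hlh : lo < hi
    · rw [bsearchFirstGt, dif_pos hlh]
      have hmlt : (lo + hi) / 2 < hi := by omega
      have hmge : lo ≤ (lo + hi) / 2 := by omega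
      have hmlen : (lo + hi) / 2 < lst.length := lt_of_lt_of_le hmlt h2
      rw [List.getD_eq_getElem lst 0 hmlen]
      by_cases hcmp : prev < lst[(lo + hi) / 2]
      · rw [if_pos hcmp]
        refine ihn lo ((lo + hi) / 2) (by omega) (by omega) (by omega) hlow ?_
        intro k hk hmk
        exact lt_of_lt_of_le hcmp (sorted_le_of_le lst hs hmlen hk hmk)
      · rw [if_neg hcmp]
        have hple : lst[(lo + hi) / 2] ≤ prev := not_lt.mp hcmp
        have hres := ihn ((lo + hi) / 2 + 1) hi (by omega) (by omega) h2
          (fun k hk hkm => le_trans (sorted_le_of_le lst hs hk hmlen (by omega)) hple) hhigh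
        exact ⟨by omega, hres.2.1, hres.2.2.1, hres.2.2.2⟩
    · rw [bsearchFirstGt, dif_neg hlh]
      have heq : lo = hi := by omega
      exact ⟨le_refl _, by omega, hlow, fun k hk hlk => hhigh k hk (heq ▸ hlk)⟩

-- c ∉ s: the head of a cons can not embed
theorem not_sublist_of_not_mem {c : Char} {cs s : List Char} (h : c ∉ s) :
    ¬ (c :: cs).Sublist s := fun hsub => h (hsub.subset (List.mem_cons_self))

theorem sublist_cons_ne {c x : Char} {l r : List Char} (h : c ≠ x) :
    ((c :: l).Sublist (x :: r)) ↔ ((c :: l).Sublist r) := by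
  constructor
  · intro hs
    cases hs with
    | cons _ h' => exact h'
    | cons₂ => exact absurd rfl h
  · exact fun hs => hs.cons x

-- first occurrence of c in s at index m: peeling it off characterises the cons-sublist
theorem cons_sublist_iff_first (c : Char) (cs : List Char) :
    ∀ (m : Nat) (s : List Char) (hm : m < s.length), s[m] = c →
    (∀ k (hk : k < s.length), k < m → s[k] ≠ c) →
    ((c :: cs).Sublist s ↔ cs.Sublist (s.drop (m + 1))) := by
  intro m
  induction m with
  | zero =>
    intro s hm hc _
    match s, hm with
    | x :: s', _ =>
      have : x = c := hc
      subst this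
      simp [List.cons_sublist_cons]
  | succ m ihm =>
    intro s hm hc hf
    match s, hm with
    | x :: s', hm =>
      have hxc : c ≠ x := fun h => (hf 0 (by omega) (by omega)) h.symm
      rw [sublist_cons_ne hxc]
      have hm' : m < s'.length := by simpa using hm
      have hc' : s'[m] = c := by simpa using hc
      have hf' : ∀ k (hk : k < s'.length), k < m → s'[k] ≠ c := by
        intro k hk hkm
        have := hf (k + 1) (by simpa using Nat.succ_lt_succ hk) (by omega)
        simpa using this
      simp only [List.drop_succ_cons]
      exact ihm s' hm' hc' hf'

-- Main B-side lemma: the scan decides sublist-ness of the remaining suffix.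
theorem scanB_eq (w : List Char) (cs : List Char) :
    ∀ (prev : Int), -1 ≤ prev →
    scanB (buildPos w) cs prev = decide (cs.Sublist (w.drop (prev + 1).toNat)) := by
  induction cs with
  | nil => intro prev _; simp [scanB]
  | cons c cs ih =>
    intro prev hprev
    have ht : (((prev + 1).toNat : Nat) : Int) = prev + 1 := Int.toNat_of_nonneg (by omega)
    rw [scanB]
    cases hg : (buildPos w).get? c with
    | none =>
      dsimp only
      have hocc : occList w c = [] := buildPos_get?_none w c hg
      have hnot : c ∉ w.drop (prev + 1).toNat := by
        intro hmem
        obtain ⟨k, hk, hck⟩ := List.mem_iff_getElem.mp hmem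
        have hlen : (w.drop (prev + 1).toNat).length = w.length - (prev + 1).toNat :=
          List.length_drop
        have hk' : (prev + 1).toNat + k < w.length := by omega
        have hmem2 : (((prev + 1).toNat + k : Nat) : Int) ∈ occList w c :=
          (mem_occList w c _).mpr ⟨(prev + 1).toNat + k, hk', rfl,
            by rw [← List.getElem_drop]; exact hck⟩
        rw [hocc] at hmem2
        exact absurd hmem2 (List.not_mem_nil)
      simp [not_sublist_of_not_mem hnot]
    | some lst =>
      dsimp only
      have hlst : lst = occList w c := buildPos_get?_some w c lst hg
      have hsort : lst.Pairwise (· < ·) := hlst ▸ occList_sorted w c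
      obtain ⟨r, hrdef⟩ : ∃ r, bsearchFirstGt lst prev 0 lst.length = r := ⟨_, rfl⟩
      have hspec := bsearch_spec lst prev hsort lst.length 0 lst.length
        (by omega) (by omega) le_rfl (by intro k hk hk0; omega) (by intro k hk hk'; omega)
      rw [hrdef] at hspec
      obtain ⟨hr0, hrlen, hlow, hhigh⟩ := hspec
      rw [hrdef]
      by_cases hr : r = lst.length
      · have hnot : c ∉ w.drop (prev + 1).toNat := by
          intro hmem
          obtain ⟨k, hk, hck⟩ := List.mem_iff_getElem.mp hmem
          have hlen : (w.drop (prev + 1).toNat).length = w.length - (prev + 1).toNat :=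
            List.length_drop
          have hk' : (prev + 1).toNat + k < w.length := by omega
          have hmem2 : (((prev + 1).toNat + k : Nat) : Int) ∈ lst :=
            hlst ▸ (mem_occList w c _).mpr ⟨(prev + 1).toNat + k, hk', rfl,
              by rw [← List.getElem_drop]; exact hck⟩
          obtain ⟨idx, hidx, hidxe⟩ := List.mem_iff_getElem.mp hmem2
          have hle : lst[idx] ≤ prev := hlow idx hidx (by omega)
          rw [hidxe] at hle
          omega
        simp [hr, not_sublist_of_not_mem hnot]
      · have hrlt : r < lst.length := lt_of_le_of_ne hrlen hr
        have hj : prev < lst[r] := hhigh _ hrlt le_rfl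
        have hjm : lst[r] ∈ occList w c := hlst ▸ List.getElem_mem _
        obtain ⟨k0, hk0, hje, hwc⟩ := (mem_occList w c _).mp hjm
        have htk0 : (prev + 1).toNat ≤ k0 := by rw [hje] at hj; omega
        have hmin : ∀ (k : Nat) (hkw : k < w.length), (prev + 1).toNat ≤ k → k < k0 → w[k] ≠ c := by
          intro k hkw hkt hkk0 hkc
          have hmem2 : ((k : Nat) : Int) ∈ lst :=
            hlst ▸ (mem_occList w c _).mpr ⟨k, hkw, rfl, hkc⟩
          obtain ⟨idx, hidx, hidxe⟩ := List.mem_iff_getElem.mp hmem2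
          have hgt : prev < lst[idx] := by rw [hidxe]; omega
          have hidxr : r ≤ idx := by
            by_contra hlt'
            exact absurd (hlow idx hidx (by omega)) (not_le.mpr hgt)
          have hmono := sorted_le_of_le lst hsort hrlt hidx hidxr
          rw [hje, hidxe] at hmono
          omega
        have hdlen : (w.drop (prev + 1).toNat).length = w.length - (prev + 1).toNat :=
          List.length_drop
        have hmlt : k0 - (prev + 1).toNat < (w.drop (prev + 1).toNat).length := by omega
        have hidx2 : (prev + 1).toNat + (k0 - (prev + 1).toNat) = k0 := by omega
        have hsm : (w.drop (prev + 1).toNat)[k0 - (prev + 1).toNat] = c := by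
          rw [List.getElem_drop]
          simp only [hidx2]
          exact hwc
        have hfirst : ∀ k (hk : k < (w.drop (prev + 1).toNat).length),
            k < k0 - (prev + 1).toNat → (w.drop (prev + 1).toNat)[k] ≠ c := by
          intro k hk hklt
          rw [List.getElem_drop]
          exact hmin _ (by omega) (by omega) (by omega)
        have hiff := cons_sublist_iff_first c cs (k0 - (prev + 1).toNat)
          (w.drop (prev + 1).toNat) hmlt hsm hfirst
        have hdd : (w.drop (prev + 1).toNat).drop (k0 - (prev + 1).toNat + 1)
            = w.drop (k0 + 1) := by rw [List.drop_drop]; congr 1; omega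
        have hiff2 : (c :: cs).Sublist (w.drop (prev + 1).toNat)
            ↔ cs.Sublist (w.drop (k0 + 1)) := by rw [← hdd]; exact hiff
        have hih := ih (lst[r]) (by rw [hje]; omega)
        have htn : (lst[r] + 1).toNat = k0 + 1 := by rw [hje]; omega
        rw [if_neg hr, List.getD_eq_getElem lst 0 hrlt, hih, htn,
          decide_eq_decide.mpr hiff2]

-- A-side lemma: A's loop decides sublist-ness of the remaining pattern.
theorem isPredLoopA_eq (p : List Char) :
    ∀ (w : List Char) (k : Nat), k ≤ p.length →
    isPredLoopA p w (k : Int) = decide ((p.drop k).Sublist w) := by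
  intro w
  induction w with
  | nil =>
    intro k hk
    simp only [isPredLoopA, List.sublist_nil, List.drop_eq_nil_iff]
    by_cases h : k = p.length
    · subst h; simp
    · have h1 : ((k : Int) == (p.length : Int)) = false := by
        rw [beq_eq_false_iff_ne]; intro hc; exact h (by exact_mod_cast hc)
      have h2 : ¬ (p.length ≤ k) := by omega
      simp [h1, h2]
  | cons letter rest ihw =>
    intro k hk
    rcases Nat.lt_or_ge k p.length with hlt | hge
    · have hget : PySem.List.pyGet? p (k : Int) = some p[k] := PySem.List.pyGet?_ofNat p k hlt
      have hnle : ¬ ((p.length : Int) ≤ (k : Int)) := by exact_mod_cast Nat.not_le_of_lt hlt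
      have hdrop : p.drop k = p[k] :: p.drop (k + 1) := List.drop_eq_getElem_cons hlt
      rw [isPredLoopA, if_neg hnle, hget, hdrop]
      by_cases hc : p[k] = letter
      · have hcast : ((k : Int) + 1) = ((k + 1 : Nat) : Int) := by push_cast; ring
        rw [show (p[k] :: p.drop (k + 1)) = (letter :: p.drop (k + 1)) from by rw [hc]]
        simp only [hc, beq_self_eq_true, if_true]
        rw [hcast, ihw (k + 1) hlt, decide_eq_decide.mpr List.cons_sublist_cons]
      · have hbeq : (some p[k] == some letter) = false := by simp [hc]
        rw [hbeq]
        simp only [Bool.false_eq_true, if_false]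
        rw [ihw k hk, hdrop]
        exact decide_eq_decide.mpr (sublist_cons_ne hc).symm
    · have hkl : k = p.length := by omega
      subst hkl
      have hle : ((p.length : Int) ≤ ((p.length : Nat) : Int)) := le_refl _
      rw [isPredLoopA, if_pos hle]
      simp

-- ===== VERDICT (by name: the statement is the Claim_ definition above) =====
theorem is_predecessor_spec : Claim_equal_is_predecessor := by
  intro p w _
  unfold Spec_is_predecessor is_predecessor is_predecessor_alt
  have ha := isPredLoopA_eq p.toList w.toList 0 (Nat.zero_le _)
  have hb := scanB_eq w.toList p.toList (-1) (by norm_num)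
  simp only [Nat.cast_zero, List.drop_zero] at ha
  norm_num at hb
  rw [ha]; exact hb.symm ▸ rfl
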